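-- pv_equiv track=rewrite | github.com/asl2ru/sf_data_science | project_0/game_v3.py | by_category_predict
-- ===== SOURCE A (Python) =====
-- def by_category_predict(number: int = 1) -> int:
--     """Угадываем число методом поиска по разрядаум -
--     сначала находим десятки потом единицы числа
--
--     Args:
--         number (int, optional): Загаданное число. Defaults to 1.
--
--     Returns:
--         int: Число попыток
--     """
--     count = 0
--     tens = 5 # десятки
--     units = 5 # единицы
--     predict_number = tens * 10 + units
--
--     while number // 10 != tens:
--         if tens > number // 10: tens -= 1
--         else: tens += 1
--         count += 1
--
--     while number % 10 != units:
--         if units > number % 10: units -= 1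
--         else: units += 1
--         count += 1
--
--     return count
-- ===== SOURCE B (Python) =====
-- def by_category_predict(number: int = 1) -> int:
--     return abs(5 - number // 10) + abs(5 - number % 10)
-- ===== Notes on version B (the rewrite author's own statement) =====
-- stated objective: simpler
-- what changed: Replaces the two digit-stepping while loops with the closed form abs(5 - number//10) + abs(5 - number%10), using Python floor division/modulo so negative inputs match.
import Mathlib
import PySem

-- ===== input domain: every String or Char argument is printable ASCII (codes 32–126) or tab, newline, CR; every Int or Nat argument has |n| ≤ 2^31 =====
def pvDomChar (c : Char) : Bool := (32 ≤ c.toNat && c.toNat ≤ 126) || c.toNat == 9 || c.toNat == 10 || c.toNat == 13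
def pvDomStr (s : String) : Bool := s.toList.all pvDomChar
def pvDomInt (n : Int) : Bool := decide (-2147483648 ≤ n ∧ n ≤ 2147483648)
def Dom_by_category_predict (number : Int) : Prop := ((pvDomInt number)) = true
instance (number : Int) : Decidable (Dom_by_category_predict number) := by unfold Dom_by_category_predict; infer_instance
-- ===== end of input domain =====

-- B replaces A's two digit-stepping loops by the closed form |5 - number//10| + |5 - number%10| (simpler, O(1)).

-- ===== PORT A =====
-- each while loop: step the digit by 1 toward the target, counting steps
def pvStepLoop (target digit count : Int) : Int :=
  if digit = target then count
  else pvStepLoop target (if digit > target then digit - 1 else digit + 1) (count + 1)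
termination_by (digit - target).natAbs
decreasing_by
  all_goals (rename_i h; split_ifs <;> omega)

def by_category_predict (number : Int) : Int :=
  let count : Int := 0
  let tens : Int := 5
  let units : Int := 5
  let count := pvStepLoop (PySem.Int.floordiv number 10) tens count
  let count := pvStepLoop (PySem.Int.mod number 10) units count
  count

-- ===== PORT B =====
def by_category_predict_alt (number : Int) : Int :=
  |5 - PySem.Int.floordiv number 10| + |5 - PySem.Int.mod number 10|

-- ===== PRECONDITION & SPEC =====
def Spec_by_category_predict (number : Int) (out : Int) : Prop := out = by_category_predict_alt number
instance (number : Int) (out : Int) : Decidable (Spec_by_category_predict number out) := by unfold Spec_by_category_predict; infer_instance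

-- ===== CLAIM (what is proved, stated in full; the proofs are below) =====
def Claim_equal_by_category_predict : Prop := ∀ (number : Int), Dom_by_category_predict number → Spec_by_category_predict number (by_category_predict number)

-- ===== LEMMAS AND PROOFS =====
theorem pvStepLoop_eq (target digit count : Int) :
    pvStepLoop target digit count = count + |digit - target| := by
  generalize hn : (digit - target).natAbs = n
  induction n generalizing digit count with
  | zero =>
      have h : digit = target := by omega
      rw [pvStepLoop]; simp [h]
  | succ n ih =>
      have h : digit ≠ target := by omega
      rw [pvStepLoop]
      rw [if_neg h]
      rcases lt_or_gt_of_ne h with hlt | hgt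
      · have hgt' : ¬ digit > target := by omega
        rw [if_neg hgt', ih _ _ (by omega)]
        rw [abs_of_nonpos (by omega), abs_of_nonpos (by omega)]
        ring
      · rw [if_pos hgt, ih _ _ (by omega)]
        rw [abs_of_nonneg (by omega), abs_of_nonneg (by omega)]
        ring

-- ===== VERDICT (by name: the statement is the Claim_ definition above) =====
theorem by_category_predict_spec : Claim_equal_by_category_predict := by
  intro number _
  unfold Spec_by_category_predict by_category_predict by_category_predict_alt
  simp only [pvStepLoop_eq]
  rw [abs_sub_comm (5 : Int), abs_sub_comm (5 : Int)]
  ring
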